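-- pv_equiv track=rewrite | github.com/Samanizer/cs-gca | cyclic-shift.py | min_cyclic_shift
-- ===== SOURCE A (Python) =====
-- def min_cyclic_shift(arr):
--     n = len(arr)
--     target = sorted(arr)
--
--     for i in range(n):
--         rotated = arr[i:] + arr[:i]
--         if rotated == target:
--             return i
--
--     return -1
-- ===== SOURCE B (Python) =====
-- def min_cyclic_shift(arr):
--     n = len(arr)
--     if n == 0:
--         return -1
--     drop = -1
--     for p in range(n - 1):
--         if arr[p] > arr[p + 1]:
--             if drop != -1:
--                 return -1
--             drop = p
--     if drop == -1:
--         return 0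
--     return drop + 1 if arr[-1] <= arr[0] else -1
-- ===== Notes on version B (the rewrite author's own statement) =====
-- stated objective: faster
-- what changed: A tries every rotation arr[i:]+arr[:i] and compares it with sorted(arr); B makes a single pass counting descents, since a rotation of arr is nondecreasing iff there is at most one descent arr[p]>arr[p+1] and, for a nonzero shift, the last element joins the first: B returns zero, the descent index plus one, or the not-found sentinel.
import Mathlib
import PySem

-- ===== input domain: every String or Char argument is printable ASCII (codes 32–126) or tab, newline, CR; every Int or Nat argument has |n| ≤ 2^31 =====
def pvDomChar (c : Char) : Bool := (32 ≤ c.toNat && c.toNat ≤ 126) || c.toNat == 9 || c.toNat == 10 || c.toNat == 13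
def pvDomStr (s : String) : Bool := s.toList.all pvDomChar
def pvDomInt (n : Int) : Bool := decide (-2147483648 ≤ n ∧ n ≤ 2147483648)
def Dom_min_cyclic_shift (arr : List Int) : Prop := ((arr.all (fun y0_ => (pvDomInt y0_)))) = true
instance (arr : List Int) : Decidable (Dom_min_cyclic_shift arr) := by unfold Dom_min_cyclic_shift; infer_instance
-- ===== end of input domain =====

-- B replaces A's quadratic "try every rotation against sorted(arr)" by one linear pass that
-- counts descents (a rotation of arr is nondecreasing iff it avoids every descent and the
-- ends join), objective: faster.

-- ===== PORT A =====
-- 'for i in range(n): rotated = arr[i:] + arr[:i]; if rotated == target: return i' / 'return -1'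
def minShiftLoopA (arr target : List Int) (n i : Nat) : Int :=
  if _h : i < n then
    if PySem.List.slice arr (some (i : Int)) none ++ PySem.List.slice arr none (some (i : Int)) = target then
      (i : Int)
    else minShiftLoopA arr target n (i + 1)
  else -1
termination_by n - i

def min_cyclic_shift (arr : List Int) : Int :=
  let n := arr.length
  let target := PySem.List.sorted arr (fun x => x) false
  minShiftLoopA arr target n 0

-- ===== PORT B =====
-- 'for p in range(n-1): if arr[p] > arr[p+1]: (second descent -> return -1, else drop = p)',
-- then 'return 0 / drop+1 / -1'; arr[p] and arr[p+1] are always in range here, arr[-1] is PySem.List.pyGetD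
def minShiftLoopB (arr : List Int) (n p : Nat) (drop : Int) : Int :=
  if _h : p < n - 1 then
    if arr.getD (p + 1) 0 < arr.getD p 0 then
      if drop ≠ -1 then -1
      else minShiftLoopB arr n (p + 1) (p : Int)
    else minShiftLoopB arr n (p + 1) drop
  else
    if drop = -1 then 0
    else if PySem.List.pyGetD arr (-1) 0 ≤ arr.getD 0 0 then drop + 1 else -1
termination_by n - 1 - p

def min_cyclic_shift_alt (arr : List Int) : Int :=
  let n := arr.length
  if n = 0 then -1
  else minShiftLoopB arr n 0 (-1)

-- ===== PRECONDITION & SPEC =====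
def Spec_min_cyclic_shift (arr : List Int) (out : Int) : Prop := out = min_cyclic_shift_alt arr
instance (arr : List Int) (out : Int) : Decidable (Spec_min_cyclic_shift arr out) := by unfold Spec_min_cyclic_shift; infer_instance

-- ===== CLAIM (what is proved, stated in full; the proofs are below) =====
def Claim_equal_min_cyclic_shift : Prop := ∀ (arr : List Int), Dom_min_cyclic_shift arr → Spec_min_cyclic_shift arr (min_cyclic_shift arr)

-- ===== LEMMAS AND PROOFS =====

-- the rotation by i, written with drop/take (what A's slices compute)
def pvRot (arr : List Int) (i : Nat) : List Int := arr.drop i ++ arr.take i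

lemma pvRot_getD (arr : List Int) (i j : Nat) (hi : i ≤ arr.length) (hj : j < arr.length) :
    (pvRot arr i).getD j 0 =
      if j < arr.length - i then arr.getD (i + j) 0 else arr.getD (j - (arr.length - i)) 0 := by
  have hlen : (arr.drop i).length = arr.length - i := by simp
  unfold pvRot
  split_ifs with h
  · rw [List.getD_eq_getElem _ _ (by simp; omega), List.getD_eq_getElem _ _ (by omega),
      List.getElem_append_left (by omega)]
    simp
  · rw [List.getD_eq_getElem _ _ (by simp; omega), List.getD_eq_getElem _ _ (by omega),
      List.getElem_append_right (by omega)]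
    rw [List.getElem_take]
    congr 1
    omega

lemma chain'_iff_getD (l : List Int) :
    l.IsChain (· ≤ ·) ↔ ∀ j, j + 1 < l.length → l.getD j 0 ≤ l.getD (j + 1) 0 := by
  rw [List.isChain_iff_getElem]
  constructor
  · intro h j hj
    rw [List.getD_eq_getElem _ _ (by omega), List.getD_eq_getElem _ _ hj]
    exact h j hj
  · intro h j hj
    have := h j hj
    rwa [List.getD_eq_getElem _ _ (by omega), List.getD_eq_getElem _ _ hj] at this

def pvC (arr : List Int) (i : Nat) : Prop :=
  (∀ j, i ≤ j → j + 1 < arr.length → arr.getD j 0 ≤ arr.getD (j + 1) 0) ∧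
  (∀ j, j + 1 < i → arr.getD j 0 ≤ arr.getD (j + 1) 0) ∧
  (i = 0 ∨ arr.getD (arr.length - 1) 0 ≤ arr.getD 0 0)

lemma pvRot_length (arr : List Int) (i : Nat) :
    (pvRot arr i).length = arr.length := by
  simp [pvRot]; omega

lemma pvChain_rot_iff (arr : List Int) (i : Nat) (hi : i < arr.length) :
    (pvRot arr i).IsChain (· ≤ ·) ↔ pvC arr i := by
  set n := arr.length with hn
  rw [chain'_iff_getD]
  constructor
  · intro h
    refine ⟨fun j hij hj1 => ?_, fun j hj1 => ?_, ?_⟩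
    · have := h (j - i) (by rw [pvRot_length]; omega)
      rw [pvRot_getD arr i (j-i) (by omega) (by omega), pvRot_getD arr i (j-i+1) (by omega) (by omega)] at this
      rw [if_pos (by omega), if_pos (by omega)] at this
      have e1 : i + (j - i) = j := by omega
      have e2 : i + (j - i + 1) = j + 1 := by omega
      rw [e1, e2] at this
      exact this
    · have := h (j + (n - i)) (by rw [pvRot_length]; omega)
      rw [pvRot_getD arr i _ (by omega) (by omega), pvRot_getD arr i _ (by omega) (by omega)] at this
      rw [if_neg (by omega), if_neg (by omega)] at this
      have e1 : j + (n - i) - (n - i) = j := by omega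
      have e2 : j + (n - i) + 1 - (n - i) = j + 1 := by omega
      rw [e1, e2] at this
      exact this
    · by_cases hi0 : i = 0
      · exact Or.inl hi0
      · refine Or.inr ?_
        have := h (n - i - 1) (by rw [pvRot_length]; omega)
        rw [pvRot_getD arr i _ (by omega) (by omega), pvRot_getD arr i _ (by omega) (by omega)] at this
        rw [if_pos (by omega), if_neg (by omega)] at this
        have e1 : i + (n - i - 1) = n - 1 := by omega
        have e2 : n - i - 1 + 1 - (n - i) = 0 := by omega
        rw [e1, e2] at this
        exact this
  · rintro ⟨h1, h2, h3⟩ j hj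
    rw [pvRot_length] at hj
    rw [pvRot_getD arr i j (by omega) (by omega), pvRot_getD arr i (j+1) (by omega) (by omega)]
    by_cases hc1 : j + 1 < n - i
    · rw [if_pos (by omega), if_pos hc1]
      have := h1 (i + j) (by omega) (by omega)
      simpa [Nat.add_assoc] using this
    · by_cases hc2 : j + 1 = n - i
      · rw [if_pos (by omega), if_neg (by omega)]
        have e1 : i + j = n - 1 := by omega
        have e2 : j + 1 - (n - i) = 0 := by omega
        rw [e1, e2]
        rcases h3 with h3 | h3
        · omega
        · exact h3
      · rw [if_neg (by omega), if_neg (by omega)]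
        have := h2 (j - (n - i)) (by omega)
        have e2 : j + 1 - (n - i) = j - (n - i) + 1 := by omega
        rw [e2]
        exact this

lemma pvRot_perm (arr : List Int) (i : Nat) : (pvRot arr i).Perm arr := by
  unfold pvRot
  calc (arr.drop i ++ arr.take i).Perm (arr.take i ++ arr.drop i) := List.perm_append_comm
    _ = arr := List.take_append_drop i arr

lemma pvRot_eq_sorted_iff (arr : List Int) (i : Nat) :
    (pvRot arr i = PySem.List.sorted arr (fun x => x) false) ↔ (pvRot arr i).IsChain (· ≤ ·) := by
  constructor
  · intro h
    rw [h, List.isChain_iff_pairwise]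
    exact PySem.List.sorted_pairwise arr (fun x => x)
  · intro h
    rw [List.isChain_iff_pairwise] at h
    exact (PySem.List.sorted_id_eq_of_perm_of_pairwise arr (pvRot arr i) (pvRot_perm arr i) h).symm


lemma loopA_slice (arr : List Int) (i : Nat) :
    PySem.List.slice arr (some (i : Int)) none ++ PySem.List.slice arr none (some (i : Int)) = pvRot arr i := by
  rw [PySem.List.slice_from_natCast, PySem.List.slice_to_natCast, pvRot]

lemma loopA_none (arr target : List Int) (n i : Nat)
    (h : ∀ j, i ≤ j → j < n → pvRot arr j ≠ target) :
    minShiftLoopA arr target n i = -1 := by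
  unfold minShiftLoopA
  split_ifs with h1 h2
  · exact absurd (loopA_slice arr i ▸ h2) (h i le_rfl h1)
  · exact loopA_none arr target n (i + 1) (fun j hj hjn => h j (by omega) hjn)
  · rfl
termination_by n - i

lemma loopA_first (arr target : List Int) (n i k : Nat) (hik : i ≤ k) (hk : k < n)
    (hP : pvRot arr k = target)
    (hnot : ∀ j, i ≤ j → j < k → pvRot arr j ≠ target) :
    minShiftLoopA arr target n i = (k : Int) := by
  unfold minShiftLoopA
  rw [dif_pos (by omega)]
  rw [loopA_slice arr i]
  by_cases hik' : i = k
  · rw [if_pos (hik' ▸ hP), hik']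
  · rw [if_neg (hnot i le_rfl (by omega))]
    exact loopA_first arr target n (i + 1) k (by omega) hk hP (fun j hj hjk => hnot j (by omega) hjk)
termination_by k - i

lemma loopB_none (arr : List Int) (n p : Nat) (d : Int)
    (h : ∀ q, p ≤ q → q + 1 < n → ¬ arr.getD (q + 1) 0 < arr.getD q 0) :
    minShiftLoopB arr n p d =
      if d = -1 then 0
      else if PySem.List.pyGetD arr (-1) 0 ≤ arr.getD 0 0 then d + 1 else -1 := by
  by_cases h1 : p < n - 1
  · conv_lhs => rw [minShiftLoopB]
    rw [dif_pos h1, if_neg (h p le_rfl (by omega))]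
    exact loopB_none arr n (p + 1) d (fun q hq hqn => h q (by omega) hqn)
  · conv_lhs => rw [minShiftLoopB]
    rw [dif_neg h1]
termination_by n - 1 - p

lemma loopB_dead (arr : List Int) (n p : Nat) (d : Int) (hd : d ≠ -1)
    (q : Nat) (hpq : p ≤ q) (hq : q + 1 < n) (hdesc : arr.getD (q + 1) 0 < arr.getD q 0) :
    minShiftLoopB arr n p d = -1 := by
  conv_lhs => rw [minShiftLoopB]
  rw [dif_pos (by omega)]
  by_cases h2 : arr.getD (p + 1) 0 < arr.getD p 0
  · rw [if_pos h2, if_pos hd]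
  · rw [if_neg h2]
    have hne : p ≠ q := fun e => h2 (e ▸ hdesc)
    exact loopB_dead arr n (p + 1) d hd q (by omega) hq hdesc
termination_by n - 1 - p

lemma loopB_to_first (arr : List Int) (n p q : Nat) (hpq : p ≤ q) (hq : q + 1 < n)
    (hdesc : arr.getD (q + 1) 0 < arr.getD q 0)
    (hmin : ∀ j, p ≤ j → j < q → ¬ arr.getD (j + 1) 0 < arr.getD j 0) :
    minShiftLoopB arr n p (-1) = minShiftLoopB arr n (q + 1) (q : Int) := by
  by_cases hpq' : p = q
  · subst hpq'
    conv_lhs => rw [minShiftLoopB]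
    rw [dif_pos (by omega), if_pos hdesc, if_neg (by simp)]
  · conv_lhs => rw [minShiftLoopB]
    rw [dif_pos (by omega), if_neg (hmin p le_rfl (by omega))]
    exact loopB_to_first arr n (p + 1) q (by omega) hq hdesc (fun j hj hjq => hmin j (by omega) hjq)
termination_by q - p

-- ===== VERDICT (by name: the statement is the Claim_ definition above) =====
theorem min_cyclic_shift_spec : Claim_equal_min_cyclic_shift := by
  intro arr _
  show min_cyclic_shift arr = min_cyclic_shift_alt arr
  unfold min_cyclic_shift min_cyclic_shift_alt
  set n := arr.length with hn
  set tgt := PySem.List.sorted arr (fun x => x) false with htgt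
  have hA_iff : ∀ i, i < n → (pvRot arr i = tgt ↔ pvC arr i) := fun i hi =>
    (pvRot_eq_sorted_iff arr i).trans (pvChain_rot_iff arr i hi)
  by_cases hn0 : n = 0
  · rw [if_pos hn0, loopA_none arr tgt n 0 (fun j _ hj => absurd hj (by omega))]
  · rw [if_neg hn0]
    by_cases hex : ∃ q, q + 1 < n ∧ arr.getD (q + 1) 0 < arr.getD q 0
    · set q0 := Nat.find hex with hq0def
      obtain ⟨hq0n, hq0d⟩ := Nat.find_spec hex
      have hq0min : ∀ j, j < q0 → ¬ arr.getD (j + 1) 0 < arr.getD j 0 := by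
        intro j hj hd
        exact (Nat.find_min hex hj) ⟨by omega, hd⟩
      have hB1 : minShiftLoopB arr n 0 (-1) = minShiftLoopB arr n (q0 + 1) (q0 : Int) :=
        loopB_to_first arr n 0 q0 (by omega) hq0n hq0d (fun j _ hj => hq0min j hj)
      by_cases hex2 : ∃ q', q0 < q' ∧ q' + 1 < n ∧ arr.getD (q' + 1) 0 < arr.getD q' 0
      · -- two descents: both return -1
        obtain ⟨q1, hq01, hq1n, hq1d⟩ := hex2
        rw [hB1, loopB_dead arr n (q0 + 1) (q0 : Int) (by omega) q1 (by omega) hq1n hq1d]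
        refine loopA_none arr tgt n 0 (fun i _ hi hrot => ?_)
        obtain ⟨c1, c2, _⟩ := (hA_iff i hi).mp hrot
        by_cases hi0 : i ≤ q0
        · exact absurd hq0d (by simpa using c1 q0 hi0 hq0n)
        · by_cases hi1 : i ≤ q1
          · exact absurd hq1d (by simpa using c1 q1 (by omega) hq1n)
          · exact absurd hq0d (by simpa using c2 q0 (by omega))
      · have hnomore : ∀ q, q0 + 1 ≤ q → q + 1 < n → ¬ arr.getD (q + 1) 0 < arr.getD q 0 :=
          fun q hq hqn hd => hex2 ⟨q, by omega, hqn, hd⟩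
        have hB2 := loopB_none arr n (q0 + 1) (q0 : Int) hnomore
        have hne : (q0 : Int) ≠ -1 := by omega
        have hlast : PySem.List.pyGetD arr (-1) 0 = arr.getD (n - 1) 0 := by
          rw [PySem.List.pyGetD_neg_one arr 0 (by intro h; rw [h] at hn; simp at hn; omega),
            List.getLast_eq_getElem, List.getD_eq_getElem _ _ (by omega)]
        by_cases hjoin : arr.getD (n - 1) 0 ≤ arr.getD 0 0
        · -- unique descent, ends join: both return q0 + 1
          rw [hB1, hB2, if_neg hne, hlast, if_pos hjoin]
          have hrot : pvRot arr (q0 + 1) = tgt := by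
            refine (hA_iff (q0 + 1) (by omega)).mpr ⟨?_, ?_, Or.inr hjoin⟩
            · intro j hj hjn
              have := hnomore j hj (by omega)
              omega
            · intro j hj
              have := hq0min j (by omega)
              omega
          rw [loopA_first arr tgt n 0 (q0 + 1) (by omega) (by omega) hrot ?_]
          · push_cast; ring
          · intro j _ hj hrotj
            obtain ⟨c1, _, _⟩ := (hA_iff j (by omega)).mp hrotj
            exact absurd hq0d (by simpa using c1 q0 (by omega) hq0n)
        · -- unique descent, ends do not join: both return -1
          rw [hB1, hB2, if_neg hne, hlast, if_neg hjoin]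
          refine loopA_none arr tgt n 0 (fun i _ hi hrot => ?_)
          obtain ⟨c1, _, c3⟩ := (hA_iff i hi).mp hrot
          rcases c3 with rfl | c3
          · exact absurd hq0d (by simpa using c1 q0 (by omega) hq0n)
          · exact hjoin c3
    · -- no descent at all: both return 0
      push Not at hex
      rw [loopB_none arr n 0 (-1) (fun q _ hq hd => absurd hd (by simpa using hex q hq)),
        if_pos rfl]
      have hrot : pvRot arr 0 = tgt := by
        refine (hA_iff 0 (by omega)).mpr ⟨?_, ?_, Or.inl rfl⟩
        · intro j _ hjn
          have := hex j hjn
          omega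
        · intro j hj
          omega
      rw [loopA_first arr tgt n 0 0 le_rfl (by omega) hrot (fun j hj hjk => by omega)]
      rfl
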